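-- pv_equiv track=rewrite | github.com/FINIUS-GmbH/FIN-AI-Auditor | src/fin_ai_auditor/services/bsm_domain_contradiction_detector.py | _sorted_chain_steps
-- ===== SOURCE A (Python) =====
-- from typing import Sequence
--
-- def _sorted_chain_steps(values: Sequence[str]) -> list[str]:
--     unique = []
--     seen: set[str] = set()
--     for value in values:
--         normalized = str(value or "").strip()
--         if not normalized or normalized in seen:
--             continue
--         seen.add(normalized)
--         unique.append(normalized)
--     return sorted(unique, key=_chain_step_sort_key)
--
-- def _chain_step_sort_key(value: str) -> tuple[int, str]:
--     normalized = str(value or "").strip()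
--     if "DERIVED_FROM" in normalized:
--         return (0, normalized)
--     if "SUPPORTS" in normalized:
--         return (1, normalized)
--     return (9, normalized)
-- ===== SOURCE B (Python) =====
-- def _sorted_chain_steps(values):
--     seen = set()
--     derived, supports, rest = [], [], []
--     for value in values:
--         v = str(value or "").strip()
--         if not v or v in seen:
--             continue
--         seen.add(v)
--         if "DERIVED_FROM" in v:
--             derived.append(v)
--         elif "SUPPORTS" in v:
--             supports.append(v)
--         else:
--             rest.append(v)
--     return sorted(derived) + sorted(supports) + sorted(rest)
-- ===== Notes on version B (the rewrite author's own statement) =====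
-- stated objective: alternative
-- what changed: Replaces the single sorted() with a composite (category, string) key by a one-pass dedup that partitions values into three category buckets (DERIVED_FROM / SUPPORTS / other), then sorts each bucket by the plain string and concatenates.
import Mathlib
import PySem

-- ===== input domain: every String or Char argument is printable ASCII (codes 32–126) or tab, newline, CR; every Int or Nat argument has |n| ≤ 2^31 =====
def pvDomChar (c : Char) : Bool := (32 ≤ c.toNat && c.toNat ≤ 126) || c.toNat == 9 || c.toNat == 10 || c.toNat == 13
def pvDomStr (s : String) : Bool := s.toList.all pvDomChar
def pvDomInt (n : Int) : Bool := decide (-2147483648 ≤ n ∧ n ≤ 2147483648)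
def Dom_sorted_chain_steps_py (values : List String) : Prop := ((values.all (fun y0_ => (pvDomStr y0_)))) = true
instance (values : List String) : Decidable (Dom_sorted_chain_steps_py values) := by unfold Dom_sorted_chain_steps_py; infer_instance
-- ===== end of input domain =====

-- B replaces A's single sorted() with a composite key by a dedup pass that partitions values into
-- three category buckets, each sorted by the plain string and concatenated (alternative decomposition).

-- ===== PORT A =====
-- port of _chain_step_sort_key's first tuple component (the category rank)
def chain_step_sort_key_cat (value : String) : Int :=
  let normalized := PySem.Str.strip value
  if PySem.Str.isIn "DERIVED_FROM" normalized then 0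
  else if PySem.Str.isIn "SUPPORTS" normalized then 1
  else 9

def sorted_chain_steps_py (values : List String) : List String :=
  let st := values.foldl
    (fun (st : List String × PySem.Set String) value =>
      let normalized := PySem.Str.strip value
      if normalized = "" ∨ PySem.Set.contains st.2 normalized then st
      else (st.1 ++ [normalized], PySem.Set.add st.2 normalized))
    ([], PySem.Set.empty)
  PySem.List.sorted2 st.1 chain_step_sort_key_cat (fun v => PySem.Str.strip v)

-- ===== PORT B =====
def sorted_chain_steps_py_alt (values : List String) : List String :=
  let st := values.foldl
    (fun (st : PySem.Set String × List String × List String × List String) value =>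
      let v := PySem.Str.strip value
      if v = "" ∨ PySem.Set.contains st.1 v then st
      else if PySem.Str.isIn "DERIVED_FROM" v then
        (PySem.Set.add st.1 v, st.2.1 ++ [v], st.2.2.1, st.2.2.2)
      else if PySem.Str.isIn "SUPPORTS" v then
        (PySem.Set.add st.1 v, st.2.1, st.2.2.1 ++ [v], st.2.2.2)
      else
        (PySem.Set.add st.1 v, st.2.1, st.2.2.1, st.2.2.2 ++ [v]))
    (PySem.Set.empty, [], [], [])
  PySem.List.sorted st.2.1 (fun x => x) ++ PySem.List.sorted st.2.2.1 (fun x => x)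
    ++ PySem.List.sorted st.2.2.2 (fun x => x)

-- ===== PRECONDITION & SPEC =====
def Spec_sorted_chain_steps_py (values : List String) (out : List String) : Prop := out = sorted_chain_steps_py_alt values
instance (values : List String) (out : List String) : Decidable (Spec_sorted_chain_steps_py values out) := by unfold Spec_sorted_chain_steps_py; infer_instance

-- ===== CLAIM (what is proved, stated in full; the proofs are below) =====
def Claim_equal_sorted_chain_steps_py : Prop := ∀ (values : List String), Dom_sorted_chain_steps_py values → Spec_sorted_chain_steps_py values (sorted_chain_steps_py values)

-- ===== LEMMAS AND PROOFS =====

-- predicates naming the two interesting categories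
def pvD (v : String) : Bool := PySem.Str.isIn "DERIVED_FROM" v
def pvS (v : String) : Bool := PySem.Str.isIn "SUPPORTS" v

-- the lexicographic key that A's tuple key denotes
def pvKey (v : String) : Lex (Int × String) := toLex (chain_step_sort_key_cat v, PySem.Str.strip v)

-- the two loop bodies, named for the proofs (syntactically identical to the ports' lambdas)
def pvStepA : (List String × PySem.Set String) → String → (List String × PySem.Set String) :=
  fun st value =>
      let normalized := PySem.Str.strip value
      if normalized = "" ∨ PySem.Set.contains st.2 normalized then st
      else (st.1 ++ [normalized], PySem.Set.add st.2 normalized)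

def pvStepB : (PySem.Set String × List String × List String × List String) → String →
    (PySem.Set String × List String × List String × List String) :=
  fun st value =>
      let v := PySem.Str.strip value
      if v = "" ∨ PySem.Set.contains st.1 v then st
      else if PySem.Str.isIn "DERIVED_FROM" v then
        (PySem.Set.add st.1 v, st.2.1 ++ [v], st.2.2.1, st.2.2.2)
      else if PySem.Str.isIn "SUPPORTS" v then
        (PySem.Set.add st.1 v, st.2.1, st.2.2.1 ++ [v], st.2.2.2)
      else
        (PySem.Set.add st.1 v, st.2.1, st.2.2.1, st.2.2.2 ++ [v])

-- strip is idempotent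
theorem pv_dropWhile_idem (p : Char → Bool) (l : List Char) :
    List.dropWhile p (List.dropWhile p l) = List.dropWhile p l := by
  induction l with
  | nil => simp
  | cons a t ih => by_cases h : p a <;> simp [h, ih]

theorem pv_dropWhile_prefix_eq (p : Char → Bool) (m t : List Char)
    (hm : List.dropWhile p m = m) (hpre : t <+: m) : List.dropWhile p t = t := by
  cases t with
  | nil => simp
  | cons c u =>
    obtain ⟨s, hs⟩ := hpre
    by_cases hc : p c
    · exfalso
      subst hs
      rw [List.cons_append, List.dropWhile_cons, if_pos hc] at hm
      have h1 := List.length_dropWhile_le p (u ++ s)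
      rw [hm] at h1
      simp [List.length_append] at h1
    · rw [List.dropWhile_cons, if_neg hc]

theorem pv_rstrip_prefix (l : List Char) : PySem.Chars.rstrip l <+: l := by
  have h : List.dropWhile PySem.Chars.isspace l.reverse <:+ l.reverse := List.dropWhile_suffix _
  have h2 : (List.dropWhile PySem.Chars.isspace l.reverse).reverse <+: l.reverse.reverse := by
    exact List.reverse_prefix.mpr (by simpa using h)
  simpa [PySem.Chars.rstrip] using h2

theorem pv_strip_idem_chars (l : List Char) :
    PySem.Chars.strip (PySem.Chars.strip l) = PySem.Chars.strip l := by
  unfold PySem.Chars.strip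
  have hm : List.dropWhile PySem.Chars.isspace (PySem.Chars.lstrip l) = PySem.Chars.lstrip l :=
    pv_dropWhile_idem _ _
  have h1 : PySem.Chars.lstrip (PySem.Chars.rstrip (PySem.Chars.lstrip l))
      = PySem.Chars.rstrip (PySem.Chars.lstrip l) := by
    unfold PySem.Chars.lstrip
    exact pv_dropWhile_prefix_eq _ _ _ hm (pv_rstrip_prefix _)
  rw [h1]
  unfold PySem.Chars.rstrip
  simp [pv_dropWhile_idem]

theorem pv_strip_idem (s : String) : PySem.Str.strip (PySem.Str.strip s) = PySem.Str.strip s := by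
  have h : (PySem.Str.strip (PySem.Str.strip s)).toList = (PySem.Str.strip s).toList := by
    simp [PySem.Str.toList_strip, pv_strip_idem_chars]
  exact String.toList_injective h

-- Set facts on the skip condition
theorem pv_contains_append (sn : PySem.Set String) (v x : String) (h : PySem.Set.contains sn v = false) :
    PySem.Set.add sn v = sn ++ [v] := by
  have hnm : v ∉ sn := by simpa using h
  simp [PySem.Set.add, hnm]

-- the fold invariant: B's state is A's seen-set together with the three filters of A's unique list
theorem pv_loop_inv (values : List String) : ∀ (u : List String) (sn : PySem.Set String),
    (∀ x, PySem.Set.contains sn x = true ↔ x ∈ u) → u.Nodup → (∀ x ∈ u, PySem.Str.strip x = x) →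
    (values.foldl pvStepB (sn, u.filter pvD, (u.filter (fun v => !pvD v)).filter pvS,
        (u.filter (fun v => !pvD v)).filter (fun v => !pvS v))
      = ((values.foldl pvStepA (u, sn)).2,
         (values.foldl pvStepA (u, sn)).1.filter pvD,
         ((values.foldl pvStepA (u, sn)).1.filter (fun v => !pvD v)).filter pvS,
         ((values.foldl pvStepA (u, sn)).1.filter (fun v => !pvD v)).filter (fun v => !pvS v)))
    ∧ (values.foldl pvStepA (u, sn)).1.Nodup
    ∧ (∀ x ∈ (values.foldl pvStepA (u, sn)).1, PySem.Str.strip x = x) := by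
  induction values with
  | nil => intro u sn hc hn hs; exact ⟨rfl, hn, hs⟩
  | cons a t ih =>
    intro u sn hc hn hs
    simp only [List.foldl_cons]
    by_cases hskip : PySem.Str.strip a = "" ∨ PySem.Set.contains sn (PySem.Str.strip a) = true
    · have hA : pvStepA (u, sn) a = (u, sn) := by
        simp only [pvStepA]
        rw [if_pos]
        simpa using hskip
      have hB : pvStepB (sn, u.filter pvD, (u.filter (fun v => !pvD v)).filter pvS,
          (u.filter (fun v => !pvD v)).filter (fun v => !pvS v)) a
          = (sn, u.filter pvD, (u.filter (fun v => !pvD v)).filter pvS,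
          (u.filter (fun v => !pvD v)).filter (fun v => !pvS v)) := by
        simp only [pvStepB]
        rw [if_pos]
        simpa using hskip
      rw [hA, hB]
      exact ih u sn hc hn hs
    · rw [not_or] at hskip
      obtain ⟨hne, hcon⟩ := hskip
      have hcon' : PySem.Set.contains sn (PySem.Str.strip a) = false := by
        simpa using hcon
      have hnotmem : PySem.Str.strip a ∉ u := fun hmem => hcon ((hc _).mpr hmem)
      have hnotsn : PySem.Str.strip a ∉ sn := by simpa using hcon'
      have hA : pvStepA (u, sn) a = (u ++ [PySem.Str.strip a], PySem.Set.add sn (PySem.Str.strip a)) := by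
        simp only [pvStepA]
        rw [if_neg (by simp [hne, hnotsn])]
      have hc' : ∀ x, PySem.Set.contains (PySem.Set.add sn (PySem.Str.strip a)) x = true
          ↔ x ∈ u ++ [PySem.Str.strip a] := by
        intro x
        rw [pv_contains_append sn _ x hcon']
        simp only [PySem.Set.contains, List.contains_append, List.mem_append]
        constructor
        · intro h
          rcases Bool.or_eq_true_iff.mp h with h | h
          · exact Or.inl ((hc x).mp (by simpa [PySem.Set.contains] using h))
          · simp at h; simp [h]
        · intro h
          rcases h with h | h
          · exact Bool.or_eq_true_iff.mpr (Or.inl (by simpa [PySem.Set.contains] using (hc x).mpr h))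
          · simp at h; simp [h]
      have hn' : (u ++ [PySem.Str.strip a]).Nodup := by
        simp [List.nodup_append, hn]
        exact fun y hy he => hnotmem (he ▸ hy)
      have hs' : ∀ x ∈ u ++ [PySem.Str.strip a], PySem.Str.strip x = x := by
        intro x hx
        rcases List.mem_append.mp hx with h | h
        · exact hs x h
        · simp at h; subst h; exact pv_strip_idem a
      have main := ih (u ++ [PySem.Str.strip a]) (PySem.Set.add sn (PySem.Str.strip a)) hc' hn' hs'
      rw [hA]
      by_cases hd : pvD (PySem.Str.strip a)
      · have hB : pvStepB (sn, u.filter pvD, (u.filter (fun v => !pvD v)).filter pvS,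
            (u.filter (fun v => !pvD v)).filter (fun v => !pvS v)) a
            = (PySem.Set.add sn (PySem.Str.strip a),
               (u ++ [PySem.Str.strip a]).filter pvD,
               ((u ++ [PySem.Str.strip a]).filter (fun v => !pvD v)).filter pvS,
               ((u ++ [PySem.Str.strip a]).filter (fun v => !pvD v)).filter (fun v => !pvS v)) := by
          simp only [pvStepB]
          rw [if_neg (by simp [hne, hnotsn])]
          rw [if_pos (by simpa [pvD] using hd)]
          simp [List.filter_append, hd]
        rw [hB]; exact main
      · by_cases hsu : pvS (PySem.Str.strip a)
        · have hB : pvStepB (sn, u.filter pvD, (u.filter (fun v => !pvD v)).filter pvS,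
              (u.filter (fun v => !pvD v)).filter (fun v => !pvS v)) a
              = (PySem.Set.add sn (PySem.Str.strip a),
                 (u ++ [PySem.Str.strip a]).filter pvD,
                 ((u ++ [PySem.Str.strip a]).filter (fun v => !pvD v)).filter pvS,
                 ((u ++ [PySem.Str.strip a]).filter (fun v => !pvD v)).filter (fun v => !pvS v)) := by
            simp only [pvStepB]
            rw [if_neg (by simp [hne, hnotsn])]
            rw [if_neg (by simpa [pvD] using hd)]
            rw [if_pos (by simpa [pvS] using hsu)]
            simp [List.filter_append, hd, hsu]
          rw [hB]; exact main
        · have hB : pvStepB (sn, u.filter pvD, (u.filter (fun v => !pvD v)).filter pvS,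
              (u.filter (fun v => !pvD v)).filter (fun v => !pvS v)) a
              = (PySem.Set.add sn (PySem.Str.strip a),
                 (u ++ [PySem.Str.strip a]).filter pvD,
                 ((u ++ [PySem.Str.strip a]).filter (fun v => !pvD v)).filter pvS,
                 ((u ++ [PySem.Str.strip a]).filter (fun v => !pvD v)).filter (fun v => !pvS v)) := by
            simp only [pvStepB]
            rw [if_neg (by simp [hne, hnotsn])]
            rw [if_neg (by simpa [pvD] using hd)]
            rw [if_neg (by simpa [pvS] using hsu)]
            simp [List.filter_append, hd, hsu]
          rw [hB]; exact main

-- A's sorted2 with the tuple key is sorted with the lexicographic key pvKey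
theorem pv_sorted2_eq_sorted_key (xs : List String) :
    PySem.List.sorted2 xs chain_step_sort_key_cat (fun v => PySem.Str.strip v)
      = PySem.List.sorted xs pvKey := by
  have hb : (fun a b => decide (chain_step_sort_key_cat a < chain_step_sort_key_cat b)
        || (!decide (chain_step_sort_key_cat b < chain_step_sort_key_cat a)
            && decide (PySem.Str.strip a < PySem.Str.strip b)))
      = (fun a b => decide (pvKey a < pvKey b)) := by
    funext a b
    rcases lt_trichotomy (chain_step_sort_key_cat a) (chain_step_sort_key_cat b) with h | h | h
    · simp [pvKey, Prod.Lex.lt_iff, h]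
    · simp [pvKey, Prod.Lex.lt_iff, h]
    · simp [pvKey, Prod.Lex.lt_iff, h, (lt_asymm h : ¬ _), h.ne']
  show List.foldl (fun acc x => PySem.List.insertBy (fun a b =>
        decide (chain_step_sort_key_cat a < chain_step_sort_key_cat b)
        || (!decide (chain_step_sort_key_cat b < chain_step_sort_key_cat a)
            && decide (PySem.Str.strip a < PySem.Str.strip b))) x acc) [] xs
      = List.foldl (fun acc x => PySem.List.insertBy (fun a b => decide (pvKey a < pvKey b)) x acc) [] xs
  rw [hb]

-- category values on normalized strings
theorem pv_cat_of_strip (x : String) (hx : PySem.Str.strip x = x) :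
    chain_step_sort_key_cat x = (if pvD x then (0 : Int) else if pvS x then 1 else 9) := by
  simp [chain_step_sort_key_cat, hx, pvD, pvS]
  split_ifs <;> rfl

-- the partition of a list by the two predicates, as a permutation
theorem pv_partition_perm (u : List String) :
    (u.filter pvD ++ ((u.filter (fun v => !pvD v)).filter pvS
        ++ (u.filter (fun v => !pvD v)).filter (fun v => !pvS v))).Perm u := by
  have h1 : ((u.filter (fun v => !pvD v)).filter pvS
      ++ (u.filter (fun v => !pvD v)).filter (fun v => !pvS v)).Perm (u.filter (fun v => !pvD v)) :=
    List.filter_append_perm _ _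
  exact ((h1.append_left (u.filter pvD)).trans (List.filter_append_perm _ _))

-- strictly increasing within a sorted deduplicated bucket
theorem pv_sorted_strict (b : List String) (hb : b.Nodup) :
    (PySem.List.sorted b (fun x => x)).Pairwise (fun a c => a < c) := by
  have hle : (PySem.List.sorted b (fun x => x)).Pairwise (fun a c => a ≤ c) := by
    have := PySem.List.sorted_pairwise b (fun x => x)
    simpa using this
  have hnd : (PySem.List.sorted b (fun x => x)).Nodup :=
    (PySem.List.sorted_perm b (fun x => x) false).nodup_iff.mpr hb
  exact (hle.and hnd).imp (fun h => lt_of_le_of_ne h.1 h.2)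

-- main assembly: sorting the deduplicated list by the composite key equals the three sorted buckets
theorem pv_main (u : List String) (hn : u.Nodup) (hs : ∀ x ∈ u, PySem.Str.strip x = x) :
    PySem.List.sorted2 u chain_step_sort_key_cat (fun v => PySem.Str.strip v)
      = PySem.List.sorted (u.filter pvD) (fun x => x)
        ++ PySem.List.sorted ((u.filter (fun v => !pvD v)).filter pvS) (fun x => x)
        ++ PySem.List.sorted ((u.filter (fun v => !pvD v)).filter (fun v => !pvS v)) (fun x => x) := by
  rw [pv_sorted2_eq_sorted_key]
  set d := u.filter pvD with hd
  set s := (u.filter (fun v => !pvD v)).filter pvS with hsdef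
  set r := (u.filter (fun v => !pvD v)).filter (fun v => !pvS v) with hr
  -- facts about members of each bucket
  have hmemd : ∀ x ∈ PySem.List.sorted d (fun x => x), chain_step_sort_key_cat x = 0 := by
    intro x hx
    rw [PySem.List.mem_sorted] at hx
    have h1 := List.of_mem_filter hx
    have h2 := List.mem_of_mem_filter hx
    rw [pv_cat_of_strip x (hs x h2)]
    simp [h1]
  have hmems : ∀ x ∈ PySem.List.sorted s (fun x => x), chain_step_sort_key_cat x = 1 := by
    intro x hx
    rw [PySem.List.mem_sorted] at hx
    have h1 := List.of_mem_filter hx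
    have h2 := List.mem_of_mem_filter hx
    have h3 := List.of_mem_filter h2
    have h4 := List.mem_of_mem_filter h2
    rw [pv_cat_of_strip x (hs x h4)]
    simp at h3
    simp [h1, h3]
  have hmemr : ∀ x ∈ PySem.List.sorted r (fun x => x), chain_step_sort_key_cat x = 9 := by
    intro x hx
    rw [PySem.List.mem_sorted] at hx
    have h1 := List.of_mem_filter hx
    have h2 := List.mem_of_mem_filter hx
    have h3 := List.of_mem_filter h2
    have h4 := List.mem_of_mem_filter h2
    rw [pv_cat_of_strip x (hs x h4)]
    simp at h1 h3
    simp [h1, h3]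
  have hstripmem : ∀ x ∈ u, PySem.Str.strip x = x := hs
  -- lift a strict string ordering within a bucket to pvKey, given equal categories
  have liftb : ∀ (b : List String) (c : Int), (∀ x ∈ PySem.List.sorted b (fun x => x), chain_step_sort_key_cat x = c) →
      (∀ x ∈ b, x ∈ u) → b.Nodup →
      (PySem.List.sorted b (fun x => x)).Pairwise (fun a e => pvKey a < pvKey e) := by
    intro b c hcat hsub hbnd
    have hstrict := pv_sorted_strict b hbnd
    refine hstrict.imp_of_mem ?_
    intro a e ha he hlt
    have hau : a ∈ u := hsub a (by rwa [PySem.List.mem_sorted] at ha)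
    have heu : e ∈ u := hsub e (by rwa [PySem.List.mem_sorted] at he)
    rw [pvKey, pvKey, Prod.Lex.lt_iff]
    refine Or.inr ⟨by simp [hcat a ha, hcat e he], ?_⟩
    simpa [hs a hau, hs e heu] using hlt
  have hdnd : d.Nodup := hn.filter _
  have hsnd : s.Nodup := (hn.filter _).filter _
  have hrnd : r.Nodup := (hn.filter _).filter _
  have hdsub : ∀ x ∈ d, x ∈ u := fun x hx => List.mem_of_mem_filter hx
  have hssub : ∀ x ∈ s, x ∈ u := fun x hx => List.mem_of_mem_filter (List.mem_of_mem_filter hx)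
  have hrsub : ∀ x ∈ r, x ∈ u := fun x hx => List.mem_of_mem_filter (List.mem_of_mem_filter hx)
  have hpd := liftb d 0 hmemd hdsub hdnd
  have hps := liftb s 1 hmems hssub hsnd
  have hpr := liftb r 9 hmemr hrsub hrnd
  -- cross-bucket: strictly smaller category
  have hcross : ∀ (x y : String), chain_step_sort_key_cat x < chain_step_sort_key_cat y → pvKey x < pvKey y := by
    intro x y h
    rw [pvKey, pvKey, Prod.Lex.lt_iff]
    exact Or.inl (by simpa using h)
  have hpair : (PySem.List.sorted d (fun x => x) ++ PySem.List.sorted s (fun x => x)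
      ++ PySem.List.sorted r (fun x => x)).Pairwise (fun a e => pvKey a < pvKey e) := by
    rw [List.append_assoc, List.pairwise_append]
    refine ⟨hpd, ?_, ?_⟩
    · rw [List.pairwise_append]
      refine ⟨hps, hpr, ?_⟩
      intro x hx y hy
      exact hcross x y (by rw [hmems x hx, hmemr y hy]; norm_num)
    · intro x hx y hy
      rcases List.mem_append.mp hy with h | h
      · exact hcross x y (by rw [hmemd x hx, hmems y h]; norm_num)
      · exact hcross x y (by rw [hmemd x hx, hmemr y h]; norm_num)
  have hperm : (PySem.List.sorted d (fun x => x) ++ PySem.List.sorted s (fun x => x)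
      ++ PySem.List.sorted r (fun x => x)).Perm u := by
    have h1 : (PySem.List.sorted d (fun x => x)).Perm d := PySem.List.sorted_perm _ _ _
    have h2 : (PySem.List.sorted s (fun x => x)).Perm s := PySem.List.sorted_perm _ _ _
    have h3 : (PySem.List.sorted r (fun x => x)).Perm r := PySem.List.sorted_perm _ _ _
    have := (h1.append ((h2.append h3)))
    rw [List.append_assoc]
    exact this.trans (by rw [hd, hsdef, hr]; exact pv_partition_perm u)
  exact PySem.List.sorted_eq_of_perm_of_pairwise_lt u _ pvKey hperm hpair

-- ===== VERDICT (by name: the statement is the Claim_ definition above) =====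
theorem sorted_chain_steps_py_spec : Claim_equal_sorted_chain_steps_py := by
  intro values _
  unfold Spec_sorted_chain_steps_py sorted_chain_steps_py sorted_chain_steps_py_alt
  have hbase : ∀ x, PySem.Set.contains (PySem.Set.empty : PySem.Set String) x = true ↔ x ∈ ([] : List String) := by
    intro x; simp [PySem.Set.empty, PySem.Set.contains]
  have inv := pv_loop_inv values [] PySem.Set.empty hbase List.nodup_nil (by simp)
  obtain ⟨heq, hnd, hstr⟩ := inv
  show PySem.List.sorted2 (values.foldl pvStepA ([], PySem.Set.empty)).1 chain_step_sort_key_cat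
        (fun v => PySem.Str.strip v)
      = PySem.List.sorted (values.foldl pvStepB (PySem.Set.empty, [], [], [])).2.1 (fun x => x)
        ++ PySem.List.sorted (values.foldl pvStepB (PySem.Set.empty, [], [], [])).2.2.1 (fun x => x)
        ++ PySem.List.sorted (values.foldl pvStepB (PySem.Set.empty, [], [], [])).2.2.2 (fun x => x)
  have heq' : values.foldl pvStepB (PySem.Set.empty, [], [], [])
      = ((values.foldl pvStepA ([], PySem.Set.empty)).2,
         (values.foldl pvStepA ([], PySem.Set.empty)).1.filter pvD,
         ((values.foldl pvStepA ([], PySem.Set.empty)).1.filter (fun v => !pvD v)).filter pvS,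
         ((values.foldl pvStepA ([], PySem.Set.empty)).1.filter (fun v => !pvD v)).filter (fun v => !pvS v)) := by
    simpa using heq
  rw [heq']
  exact pv_main _ hnd hstr
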